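-- pv_equiv track=rewrite | github.com/hybrydz/AI-Agent-Sequence-Game | agents/Human/qvalue_logic.py | rows_to_scores
-- ===== SOURCE A (Python) =====
-- def windows_of_five(mylist):
--     windows = []
--     for i in range(len(mylist)):
--         if i <= len(mylist) - 5:
--             windows.append(mylist[i:i+5])
--
--     return windows
--
-- def rows_to_scores(board, player):
--     all_windows = []
--     for row in board:
--         for window in windows_of_five(row):
--             all_windows.append(window)
--
--     total_score = 0
--
--     for window in all_windows:
--         flag = True
--         score = 1
--         for element in window:
--             if element == player or element == 2:
--                 score  = score*2
--             if element == -player: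
--                 flag = False
--                 break
--         if flag:
--             total_score += score
--
--     return total_score
-- ===== SOURCE B (Python) =====
-- def rows_to_scores(board, player):
--     total = 0
--     for row in board:
--         cnt = 0    # count of player-or-2 cells among the (up to) 5 most recent cells
--         clean = 0  # length of the current streak of cells different from -player
--         # 'old' is the cell sliding out of the 5-cell window (None while it fills)
--         for x, old in zip(row, [None] * 5 + row):
--             if x == player or x == 2:
--                 cnt += 1
--             if old == player or old == 2:
--                 cnt -= 1
--             if x == -player:
--                 clean = 0
--             else:
--                 clean = clean + 1
--             if clean >= 5:
--                 total += 2 ** cnt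
--     return total
-- ===== Notes on version B (the rewrite author's own statement) =====
-- stated objective: faster
-- what changed: Replaces A's materialize-all-windows-then-rescan-each-window algorithm by an incremental sliding-window pass: a running count of player-or-2 cells updated by the entering and the leaving cell (via a zip with the row shifted by 5) and a streak counter of cells different from -player replacing the per-window membership scan; no window list or slice is ever built.
import Mathlib
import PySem

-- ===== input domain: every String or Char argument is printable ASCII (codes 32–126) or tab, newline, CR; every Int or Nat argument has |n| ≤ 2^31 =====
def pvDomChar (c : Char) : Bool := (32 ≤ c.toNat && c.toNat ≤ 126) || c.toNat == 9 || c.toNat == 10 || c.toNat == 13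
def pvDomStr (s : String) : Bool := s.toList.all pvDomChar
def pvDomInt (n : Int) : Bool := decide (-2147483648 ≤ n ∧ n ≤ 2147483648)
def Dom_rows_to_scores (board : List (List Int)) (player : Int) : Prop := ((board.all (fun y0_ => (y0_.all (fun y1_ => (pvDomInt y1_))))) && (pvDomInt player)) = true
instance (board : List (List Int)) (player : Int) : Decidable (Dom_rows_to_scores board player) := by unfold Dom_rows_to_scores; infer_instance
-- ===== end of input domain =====

-- B replaces A's build-all-windows-then-rescan-each-window algorithm by an incremental
-- sliding-window pass (running count updated by the entering/leaving cell, a clean-streak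
-- counter instead of the per-window membership scan); constant work per cell, measured
-- faster in a timing run.

-- ===== PORT A =====
def windowsOfFive (mylist : List Int) : List (List Int) :=
  (PySem.List.pyRange 0 (mylist.length : Int) 1).foldl
    (fun windows i =>
      if i ≤ (mylist.length : Int) - 5 then
        windows ++ [PySem.List.slice mylist (some i) (some (i + 5))]
      else windows) []

-- the inner 'for element in window' loop with its flag/break, returning (flag, score)
def winLoopA (player : Int) : List Int → Int → Bool × Int
  | [], score => (true, score)
  | e :: rest, score =>
      let score := if e = player ∨ e = 2 then score * 2 else score
      if e = -player then (false, score) else winLoopA player rest score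

def rows_to_scores (board : List (List Int)) (player : Int) : Int :=
  let all_windows :=
    board.foldl (fun acc row => (windowsOfFive row).foldl (fun a w => a ++ [w]) acc) []
  all_windows.foldl
    (fun total_score window =>
      let fs := winLoopA player window 1
      if fs.1 then total_score + fs.2 else total_score) 0

-- ===== PORT B =====
-- one iteration of B's loop body; state (cnt, clean, total); xo = (x, old) from the zip.
-- Python's '2 ** cnt' is ported as '2 ^ cnt.toNat' (cnt, a running count, never goes negative).
def bStep (player : Int) (st : Int × Int × Int) (xo : Int × Option Int) : Int × Int × Int :=
  let cnt1 := if xo.1 = player ∨ xo.1 = 2 then st.1 + 1 else st.1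
  let cnt := if xo.2 = some player ∨ xo.2 = some 2 then cnt1 - 1 else cnt1
  let clean := if xo.1 = -player then (0 : Int) else st.2.1 + 1
  let tot := if 5 ≤ clean then st.2.2 + 2 ^ cnt.toNat else st.2.2
  (cnt, clean, tot)

def rows_to_scores_alt (board : List (List Int)) (player : Int) : Int :=
  board.foldl
    (fun total row =>
      ((row.zip (List.replicate 5 (none : Option Int) ++ row.map some)).foldl
        (bStep player) (0, 0, total)).2.2)
    0

-- ===== PRECONDITION & SPEC =====
def Spec_rows_to_scores (board : List (List Int)) (player : Int) (out : Int) : Prop := out = rows_to_scores_alt board player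
instance (board : List (List Int)) (player : Int) (out : Int) : Decidable (Spec_rows_to_scores board player out) := by unfold Spec_rows_to_scores; infer_instance

-- ===== CLAIM (what is proved, stated in full; the proofs are below) =====
def Claim_equal_rows_to_scores : Prop := ∀ (board : List (List Int)) (player : Int), Dom_rows_to_scores board player → Spec_rows_to_scores board player (rows_to_scores board player)

-- ===== LEMMAS AND PROOFS =====

-- contribution of one window (common closed form both sides reduce to)
def winVal (player : Int) (w : List Int) : Int :=
  if (-player) ∈ w then 0 else 2 ^ (w.countP (fun c => c = player ∨ c = 2))

-- per-row total: sum of winVal over all length-5 windows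
def rowWin (player : Int) (row : List Int) : Int :=
  ((windowsOfFive row).map (winVal player)).sum

----------------------------------------------------------------- A side

lemma winLoopA_mem (player : Int) (w : List Int) (s : Int) (h : (-player) ∈ w) :
    (winLoopA player w s).1 = false := by
  induction w generalizing s with
  | nil => cases h
  | cons e rest ih =>
      simp only [winLoopA]
      split
      · rfl
      · rename_i hne
        rcases List.mem_cons.1 h with h1 | h1
        · exact absurd h1.symm hne
        · exact ih _ h1

lemma winLoopA_not_mem (player : Int) (w : List Int) (s : Int) (h : (-player) ∉ w) :
    winLoopA player w s = (true, s * 2 ^ (w.countP (fun c => c = player ∨ c = 2))) := by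
  induction w generalizing s with
  | nil => simp [winLoopA]
  | cons e rest ih =>
      have he : e ≠ -player := fun hc => h (hc ▸ List.mem_cons_self)
      have hr : (-player) ∉ rest := fun hc => h (List.mem_cons_of_mem _ hc)
      simp only [winLoopA, if_neg he, ih _ hr, List.countP_cons]
      by_cases hp : e = player ∨ e = 2
      · simp [hp, pow_succ]; ring
      · simp [hp]

-- A's scoring fold over a list of windows adds winVal of each
lemma foldA_eq (player : Int) (ws : List (List Int)) (t : Int) :
    ws.foldl (fun total window =>
        if (winLoopA player window 1).1 = true then total + (winLoopA player window 1).2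
        else total) t
      = t + (ws.map (winVal player)).sum := by
  induction ws generalizing t with
  | nil => simp
  | cons w rest ih =>
      simp only [List.foldl_cons, List.map_cons, List.sum_cons, ih]
      by_cases h : (-player) ∈ w
      · simp [winLoopA_mem player w 1 h, winVal, h]
      · simp [winLoopA_not_mem player w 1 h, winVal, h]; ring

-- the index set A filters out of range(len) is exactly range(len-4)
lemma filter_range_eq (L : Int) (hL : 0 ≤ L) :
    (PySem.List.pyRange 0 L 1).filter (fun i => decide (i ≤ L - 5))
      = PySem.List.pyRange 0 (L - 4) 1 := by
  by_cases h5 : L - 4 ≤ 0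
  · rw [show PySem.List.pyRange 0 (L - 4) 1 = [] from PySem.List.pyRange_one_eq_nil (by omega)]
    refine List.filter_eq_nil_iff.2 (fun i hi => ?_)
    have := PySem.List.mem_pyRange_one.1 hi
    simpa using (by omega : ¬ i ≤ L - 5)
  · rw [PySem.List.pyRange_one_append 0 (L - 4) L (by omega) (by omega), List.filter_append,
      List.filter_eq_self.2 (fun i hi => by
        have := PySem.List.mem_pyRange_one.1 hi
        simpa using (by omega : i ≤ L - 5)),
      List.filter_eq_nil_iff.2 (fun i hi => by
        have := PySem.List.mem_pyRange_one.1 hi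
        simpa using (by omega : ¬ i ≤ L - 5)),
      List.append_nil]

lemma windowsOfFive_eq (row : List Int) :
    windowsOfFive row
      = (PySem.List.pyRange 0 ((row.length : Int) - 4) 1).map
          (fun i => PySem.List.slice row (some i) (some (i + 5))) := by
  unfold windowsOfFive
  have h := PySem.List.foldl_append_if (l := PySem.List.pyRange 0 ((row.length : Int)) 1)
      (acc := ([] : List (List Int))) (fun i => decide (i ≤ (row.length : Int) - 5))
      (fun i => PySem.List.slice row (some i) (some (i + 5)))
  simp only [decide_eq_true_eq] at h
  rw [h, filter_range_eq _ (by positivity)]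
  simp

lemma rows_to_scores_eq_sum (board : List (List Int)) (player : Int) :
    rows_to_scores board player = (board.map (rowWin player)).sum := by
  unfold rows_to_scores
  simp only [PySem.List.foldl_append_singleton_eq_self]
  rw [PySem.List.foldl_append_eq_flatMap, foldA_eq]
  simp only [List.nil_append, zero_add]
  induction board with
  | nil => simp
  | cons row rest ih => simp [rowWin, ih]

----------------------------------------------------------------- B side

-- closed forms of B's loop state after processing prefix p:
-- cntOf = count of player-or-2 cells in the last (at most) 5 cells of p
def lastW (p : List Int) : List Int := p.drop (p.length - 5)

def cntOf (player : Int) (p : List Int) : Int :=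
  ((lastW p).countP (fun c => c = player ∨ c = 2) : Int)

-- cleanOf = exactly the fold B's 'clean' variable computes
def cleanOf (player : Int) (p : List Int) : Int :=
  p.foldl (fun k x => if x = -player then 0 else k + 1) 0

-- the remaining (x, old) pairs when prefix p has been consumed and s remains
def pairsOf (p s : List Int) : List (Int × Option Int) :=
  s.zip ((List.replicate 5 (none : Option Int) ++ (p ++ s).map some).drop p.length)

lemma cleanOf_append (player : Int) (p : List Int) (x : Int) :
    cleanOf player (p ++ [x]) = if x = -player then 0 else cleanOf player p + 1 := by
  simp [cleanOf]

lemma cleanOf_eq_takeWhile (player : Int) (p : List Int) :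
    cleanOf player p = ((p.reverse.takeWhile (fun a => a ≠ -player)).length : Int) := by
  induction p using List.reverseRecOn with
  | nil => simp [cleanOf]
  | append_singleton q x ih =>
      rw [cleanOf_append, ih]
      by_cases hx : x = -player <;> simp [hx]

lemma le_length_takeWhile_iff (q : List Int) (pred : Int → Bool) (n : Nat) :
    n ≤ (q.takeWhile pred).length ↔ n ≤ q.length ∧ ∀ a ∈ q.take n, pred a = true := by
  induction q generalizing n with
  | nil => cases n <;> simp
  | cons a q ih =>
      cases n with
      | zero => simp
      | succ m =>
          by_cases ha : pred a = true
          · simp [ha, ih]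
          · simp [ha]

lemma clean_iff (player : Int) (q : List Int) :
    5 ≤ cleanOf player q ↔ 5 ≤ q.length ∧ (-player) ∉ lastW q := by
  rw [cleanOf_eq_takeWhile]
  have h5 : (5 : Int) ≤ ((q.reverse.takeWhile (fun a => a ≠ -player)).length : Int)
      ↔ 5 ≤ (q.reverse.takeWhile (fun a => a ≠ -player)).length := by exact_mod_cast Iff.rfl
  rw [h5, le_length_takeWhile_iff]
  constructor
  · rintro ⟨hl, hall⟩
    simp only [List.length_reverse] at hl
    refine ⟨hl, fun hm => ?_⟩
    have : (-player) ∈ q.reverse.take 5 := by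
      rw [List.take_reverse, List.mem_reverse]
      simpa [lastW] using hm
    have := hall _ this
    simp at this
  · rintro ⟨hl, hm⟩
    refine ⟨by simpa using hl, fun a ha => ?_⟩
    rw [List.take_reverse, List.mem_reverse] at ha
    simp only [lastW] at hm
    have : a ≠ -player := fun hc => hm (hc ▸ ha)
    simpa using this

-- window bookkeeping for an appended element
lemma lastW_append_lt (p : List Int) (x : Int) (h : p.length < 5) :
    lastW (p ++ [x]) = p ++ [x] ∧ lastW p = p := by
  have h1 : (p ++ [x]).length - 5 = 0 := by simp; omega
  have h2 : p.length - 5 = 0 := by omega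
  rw [lastW, lastW, h1, h2, List.drop_zero, List.drop_zero]
  exact ⟨rfl, rfl⟩

lemma lastW_append_ge (p : List Int) (x : Int) (h : 5 ≤ p.length) :
    lastW p = p[p.length - 5]'(by omega) :: p.drop (p.length - 4) ∧
    lastW (p ++ [x]) = p.drop (p.length - 4) ++ [x] := by
  constructor
  · rw [lastW, List.drop_eq_getElem_cons (show p.length - 5 < p.length by omega),
      show p.length - 5 + 1 = p.length - 4 from by omega]
  · have h1 : (p ++ [x]).length - 5 = p.length - 4 := by simp
    rw [lastW, h1, List.drop_append_of_le_length (by omega)]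


-- appending one cell adds exactly the one new window (if the row is long enough)
lemma slice_within (p : List Int) (x i : Int) (h0 : 0 ≤ i) (h5 : i + 5 ≤ (p.length : Int)) :
    PySem.List.slice (p ++ [x]) (some i) (some (i + 5))
      = PySem.List.slice p (some i) (some (i + 5)) := by
  rw [PySem.List.slice_toNat _ h0 (by omega), PySem.List.slice_toNat _ h0 (by omega)]
  have hi : i.toNat + 5 ≤ p.length := by omega
  have ht : (i + 5).toNat - i.toNat = 5 := by omega
  rw [ht, List.drop_append_of_le_length (by omega),
    List.take_append_of_le_length (by simp; omega)]

lemma rowWin_append (player : Int) (p : List Int) (x : Int) :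
    rowWin player (p ++ [x])
      = rowWin player p
        + (if 5 ≤ p.length + 1 then winVal player (lastW (p ++ [x])) else 0) := by
  unfold rowWin
  rw [windowsOfFive_eq, windowsOfFive_eq]
  by_cases h4 : 4 ≤ p.length
  · have hlen : ((p ++ [x]).length : Int) - 4 = ((p.length : Int) - 4) + 1 := by
      simp; omega
    rw [hlen, PySem.List.pyRange_one_succ_right (show (0:Int) ≤ (p.length : Int) - 4 by omega)]
    rw [List.map_append, List.map_append]
    simp only [List.map_cons, List.map_nil]
    have hmapeq : (PySem.List.pyRange 0 ((p.length : Int) - 4) 1).map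
          (fun i => PySem.List.slice (p ++ [x]) (some i) (some (i + 5)))
        = (PySem.List.pyRange 0 ((p.length : Int) - 4) 1).map
          (fun i => PySem.List.slice p (some i) (some (i + 5))) := by
      refine List.map_congr_left (fun i hi => ?_)
      have := PySem.List.mem_pyRange_one.1 hi
      exact slice_within p x i (by omega) (by omega)
    have hlast : PySem.List.slice (p ++ [x]) (some ((p.length : Int) - 4))
          (some (((p.length : Int) - 4) + 5)) = lastW (p ++ [x]) := by
      rw [PySem.List.slice_toNat _ (by omega) (by omega)]
      have h2 : (((p.length : Int) - 4) + 5).toNat - ((p.length : Int) - 4).toNat = 5 := by omega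
      have h1 : ((p.length : Int) - 4).toNat = p.length - 4 := by omega
      rw [h2, h1, lastW]
      have h3 : (p ++ [x]).length - 5 = p.length - 4 := by simp
      rw [h3]
      exact List.take_of_length_le (by simp; omega)
    rw [hmapeq, hlast, if_pos (show 5 ≤ p.length + 1 by omega)]
    simp
  · have h1 : PySem.List.pyRange 0 (((p ++ [x]).length : Int) - 4) 1 = [] :=
      PySem.List.pyRange_one_eq_nil (by simp; omega)
    have h2 : PySem.List.pyRange 0 ((p.length : Int) - 4) 1 = [] :=
      PySem.List.pyRange_one_eq_nil (by omega)
    rw [h1, h2, if_neg (by omega)]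
    simp

-- the new head of the remaining pair list
lemma pairsOf_cons (p : List Int) (x : Int) (s : List Int) :
    pairsOf p (x :: s)
      = (x, if h : 5 ≤ p.length then some (p[p.length - 5]'(by omega)) else none)
        :: pairsOf (p ++ [x]) s := by
  unfold pairsOf
  have hlen : p.length < (List.replicate 5 (none : Option Int) ++ (p ++ x :: s).map some).length := by
    simp; omega
  rw [List.drop_eq_getElem_cons hlen]
  have harr : (p ++ [x]) ++ s = p ++ x :: s := by simp
  rw [harr]
  have hget : (List.replicate 5 (none : Option Int) ++ (p ++ x :: s).map some)[p.length]'hlen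
      = if h : 5 ≤ p.length then some (p[p.length - 5]'(by omega)) else none := by
    by_cases h : 5 ≤ p.length
    · rw [List.getElem_append_right (by simp; omega)]
      simp only [List.length_replicate]
      rw [List.getElem_map]
      rw [List.getElem_append_left (by omega), dif_pos h]
    · rw [List.getElem_append_left (by simp; omega), List.getElem_replicate, dif_neg h]
  rw [hget]
  simp [List.length_append]

-- B applied to one (x, old) pair, written out (unfolds the sequential lets)
lemma bStep_apply (player c k t x : Int) (o : Option Int) :
    bStep player (c, k, t) (x, o)
      = ((if o = some player ∨ o = some 2
            then (if x = player ∨ x = 2 then c + 1 else c) - 1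
            else (if x = player ∨ x = 2 then c + 1 else c)),
         (if x = -player then (0 : Int) else k + 1),
         (if 5 ≤ (if x = -player then (0 : Int) else k + 1)
            then t + 2 ^ ((if o = some player ∨ o = some 2
                then (if x = player ∨ x = 2 then c + 1 else c) - 1
                else (if x = player ∨ x = 2 then c + 1 else c))).toNat
            else t)) := rfl

-- the key invariant: B's fold over the remaining pairs, started from the closed-form
-- state for prefix p, lands in the closed-form state for p ++ s
lemma bFold_inv (player : Int) (s : List Int) : ∀ (p : List Int) (t : Int),
    (pairsOf p s).foldl (bStep player) (cntOf player p, cleanOf player p, t)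
      = (cntOf player (p ++ s), cleanOf player (p ++ s),
         t + rowWin player (p ++ s) - rowWin player p) := by
  induction s with
  | nil => intro p t; simp [pairsOf]
  | cons x s ih =>
      intro p t
      rw [pairsOf_cons, List.foldl_cons, bStep_apply]
      have hcnt : (if (if h : 5 ≤ p.length then some (p[p.length - 5]'(by omega)) else none) = some player ∨
               (if h : 5 ≤ p.length then some (p[p.length - 5]'(by omega)) else none) = some 2
            then (if x = player ∨ x = 2 then cntOf player p + 1 else cntOf player p) - 1
            else (if x = player ∨ x = 2 then cntOf player p + 1 else cntOf player p))
          = cntOf player (p ++ [x]) := by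
        by_cases h5 : 5 ≤ p.length
        · obtain ⟨h1, h2⟩ := lastW_append_ge p x h5
          simp only [dif_pos h5, Option.some.injEq]
          simp only [cntOf, h1, h2, List.countP_cons, List.countP_append, List.countP_nil]
          by_cases hx : x = player ∨ x = 2 <;>
            by_cases ho : p[p.length - 5]'(by omega) = player ∨ p[p.length - 5]'(by omega) = 2 <;>
              simp [hx, ho]
        · obtain ⟨h1, h2⟩ := lastW_append_lt p x (by omega)
          simp only [dif_neg h5]
          simp only [cntOf, h1, h2, List.countP_cons, List.countP_append, List.countP_nil]
          by_cases hx : x = player ∨ x = 2 <;> simp [hx]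
      have hclean : (if x = -player then (0 : Int) else cleanOf player p + 1)
          = cleanOf player (p ++ [x]) := (cleanOf_append player p x).symm
      rw [hcnt, hclean]
      have htot : (if 5 ≤ cleanOf player (p ++ [x])
            then t + 2 ^ (cntOf player (p ++ [x])).toNat else t)
          = t + rowWin player (p ++ [x]) - rowWin player p := by
        rw [rowWin_append]
        by_cases hc : 5 ≤ cleanOf player (p ++ [x])
        · obtain ⟨hl, hm⟩ := (clean_iff player (p ++ [x])).1 hc
          rw [if_pos hc, if_pos (by simpa using hl), winVal, if_neg hm]
          simp [cntOf]
          ring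
        · rw [if_neg hc]
          by_cases hl : 5 ≤ p.length + 1
          · rw [if_pos hl]
            have hm : (-player) ∈ lastW (p ++ [x]) := by
              by_contra hmm
              exact hc ((clean_iff player (p ++ [x])).2 ⟨by simpa using hl, hmm⟩)
            rw [winVal, if_pos hm]
            ring
          · rw [if_neg hl]
            ring
      rw [htot, ih (p ++ [x])]
      have hpx : (p ++ [x]) ++ s = p ++ x :: s := by simp
      rw [hpx]
      simp only [Prod.mk.injEq]
      exact ⟨trivial, trivial, by ring⟩

theorem rows_to_scores_eq_alt (board : List (List Int)) (player : Int) :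
    rows_to_scores board player = rows_to_scores_alt board player := by
  rw [rows_to_scores_eq_sum]
  unfold rows_to_scores_alt
  have hrow : ∀ (row : List Int) (total : Int),
      ((row.zip (List.replicate 5 (none : Option Int) ++ row.map some)).foldl
        (bStep player) (0, 0, total)).2.2 = total + rowWin player row := by
    intro row total
    have h0 : row.zip (List.replicate 5 (none : Option Int) ++ row.map some)
        = pairsOf [] row := by simp [pairsOf]
    have hc : cntOf player [] = 0 := by simp [cntOf, lastW]
    have hk : cleanOf player [] = 0 := by simp [cleanOf]
    rw [h0, show ((0:Int), (0:Int), total) = (cntOf player [], cleanOf player [], total) from by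
      rw [hc, hk], bFold_inv]
    simp [rowWin, windowsOfFive]
  rw [show (fun total row =>
        ((row.zip (List.replicate 5 (none : Option Int) ++ row.map some)).foldl
          (bStep player) (0, 0, total)).2.2)
      = (fun total row => total + rowWin player row) from by funext total row; rw [hrow]]
  rw [PySem.List.foldl_add]
  simp

-- ===== VERDICT (by name: the statement is the Claim_ definition above) =====
theorem rows_to_scores_spec : Claim_equal_rows_to_scores := by
  intro board player _
  exact rows_to_scores_eq_alt board player
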